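-- pv_equiv track=rewrite | github.com/alaperut/RiBo_IDR_Analisis | MCR_in_IDR_Sequences.py | score_polyamp
-- ===== SOURCE A (Python) =====
-- def score_polyamp(Sequence, window, cutoff):
--     #Sequence: amino acid seq, window: window size, cutoff: the minimum score to be considered as significant
--     #returns a string combining all the mixed charge regions and a string of the start and end loci of all mcrs
--     polyamph_regions = []
--     polyamph_Start = []
--     polyamph_End = []
--     polyamph_start = 0
--     polyamph_end = 0
--     last_start = 0
--     last_end = 0
--     i = 0
--     window = int(window)
--     for j in range(window//2,1+len(Sequence)-window//2): # double slash rounds to the nearest whole number, scan through the sequence.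
--         region = ''
--         start = j-(window//2)
--         end = j+(window//2)
--         region = Sequence[start:end]
--         pos = region.count('R')+region.count('K') # can look for anything really though, can use this to look for RS regions as well
--         neg = region.count('E')+region.count('D')
--         score = pos+neg
--         if score>=cutoff: # if found a MCR
--             if polyamph_start == 0: # if first region found in this sequence
--                 extended_reg = Sequence[polyamph_start:end]
--                 if extended_reg.count('R')+extended_reg.count('K')+extended_reg.count('E')+extended_reg.count('D')>=cutoff: # checks to see if extended region is still valid
--                     polyamph_start = start # new start to recorded mcr
--                     polyamph_end = end # new end to recorded mcr
--                     last_start = polyamph_start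
--                     last_end = polyamph_end
--             elif polyamph_end+5 > start: #if next start is within 5 from last end, join the 2
--                 if extended_reg.count('R')+extended_reg.count('K')+extended_reg.count('E')+extended_reg.count('D')>=cutoff:
--                     polyamph_end = end
--                     last_start = polyamph_start
--                     last_end = polyamph_end
--             else:
--                 if extended_reg.count('R')+extended_reg.count('K')+extended_reg.count('E')+extended_reg.count('D')>=cutoff: # append another mcr if it's far away in sequence
--                     polyamph_regions.append(Sequence[polyamph_start:polyamph_end+1])
--                     polyamph_Start.append(polyamph_start)
--                     polyamph_End.append(polyamph_end+1)
--                     polyamph_start = 0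
--                     polyamph_end = 0
--
--     if last_end!=0:
--         temp1 = Sequence[last_start:last_end+1]
--         if temp1 not in polyamph_regions:
--             polyamph_regions.append(temp1)
--             polyamph_Start.append(last_start)
--             polyamph_End.append(last_end+1)
--     return polyamph_regions, polyamph_Start, polyamph_End
-- ===== SOURCE B (Python) =====
-- def score_polyamp(Sequence, window, cutoff):
--     # Staged re-implementation: (1) one prefix-sum pass over charged residues
--     # {R,K,E,D}; (2) filter the window positions whose O(1) charge difference
--     # meets the cutoff; (3) run the merge state machine over the hit positions
--     # only, recording interval pairs; (4) build the three output lists at the end.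
--     n = len(Sequence)
--     w2 = int(window) // 2
--     pref = [0]
--     c = 0
--     for ch in Sequence:
--         c += ch in 'RKED'
--         pref.append(c)
--
--     def charged(a, b):
--         # charged residues in Sequence[a:b], Python slice index rules
--         if a < 0:
--             a += n
--         if b < 0:
--             b += n
--         a = min(max(a, 0), n)
--         b = min(max(b, 0), n)
--         return pref[b] - pref[a] if a < b else 0
--
--     hits = [j for j in range(w2, 1 + n - w2) if charged(j - w2, j + w2) >= cutoff]
--
--     intervals = []           # finalized (start, end_exclusive) pairs
--     ps = pe = ls = le = 0
--     extc = 0                 # charge of the extended region when the run began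
--     for j in hits:
--         start, end = j - w2, j + w2
--         if ps == 0:
--             extc = charged(0, end)
--             if extc >= cutoff:
--                 ps, pe, ls, le = start, end, start, end
--         elif pe + 5 > start:
--             if extc >= cutoff:
--                 pe = end
--                 ls, le = ps, end
--         elif extc >= cutoff:
--             intervals.append((ps, pe + 1))
--             ps = pe = 0
--
--     regions = [Sequence[a:b] for a, b in intervals]
--     Starts = [a for a, _ in intervals]
--     Ends = [b for _, b in intervals]
--     if le != 0:
--         temp1 = Sequence[ls:le + 1]
--         if temp1 not in regions:
--             regions.append(temp1)
--             Starts.append(ls)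
--             Ends.append(le + 1)
--     return regions, Starts, Ends
-- ===== Notes on version B (the rewrite author's own statement) =====
-- stated objective: faster
-- what changed: B is staged: one prefix-sum pass over charged residues {R,K,E,D}, then a filter collecting the window positions whose O(1) prefix-difference score meets the cutoff, then the merge state machine runs over those hit positions only and records interval pairs, from which the three output lists are built by mapping at the end; A instead rescans every window and the extended region with four .count calls inside one monolithic loop.
import Mathlib
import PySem

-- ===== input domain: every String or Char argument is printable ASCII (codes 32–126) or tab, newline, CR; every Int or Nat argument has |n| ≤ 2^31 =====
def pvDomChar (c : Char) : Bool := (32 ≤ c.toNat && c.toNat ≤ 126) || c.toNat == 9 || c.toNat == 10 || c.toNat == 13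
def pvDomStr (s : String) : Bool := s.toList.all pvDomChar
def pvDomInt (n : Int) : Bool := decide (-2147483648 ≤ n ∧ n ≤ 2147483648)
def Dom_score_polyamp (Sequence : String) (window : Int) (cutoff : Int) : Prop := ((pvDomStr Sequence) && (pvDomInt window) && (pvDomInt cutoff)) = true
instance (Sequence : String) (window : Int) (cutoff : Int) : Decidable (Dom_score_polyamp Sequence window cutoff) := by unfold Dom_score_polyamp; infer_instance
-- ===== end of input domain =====

-- B is staged: one prefix-sum pass over charged residues {R,K,E,D}, a filter of the
-- hit window positions by an O(1) prefix difference, a merge pass over the hits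
-- recording interval pairs, and the three output lists built by mapping at the end
-- (objective: faster, O(n) instead of O(n·window)).

-- ===== PORT A =====
-- loop state: (regions, Starts, Ends, polyamph_start, polyamph_end, last_start, last_end, extended_reg)
def pvStepA (Sequence : String) (cutoff w2 : Int)
    (st : List String × List Int × List Int × Int × Int × Int × Int × String) (j : Int) :
    List String × List Int × List Int × Int × Int × Int × Int × String :=
  match st with
  | (regs, Ss, Es, ps, pe, lst_s, lst_e, ext) =>
    let start := j - w2
    let stop := j + w2
    let region := PySem.Str.slice Sequence (some start) (some stop)
    let pos : Int := (PySem.Str.count region "R" : Int) + (PySem.Str.count region "K" : Int)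
    let neg : Int := (PySem.Str.count region "E" : Int) + (PySem.Str.count region "D" : Int)
    let score := pos + neg
    if cutoff ≤ score then
      if ps = 0 then
        let ext' := PySem.Str.slice Sequence (some ps) (some stop)
        if cutoff ≤ ((PySem.Str.count ext' "R" + PySem.Str.count ext' "K"
            + PySem.Str.count ext' "E" + PySem.Str.count ext' "D" : Nat) : Int) then
          (regs, Ss, Es, start, stop, start, stop, ext')
        else (regs, Ss, Es, ps, pe, lst_s, lst_e, ext')
      else if pe + 5 > start then
        if cutoff ≤ ((PySem.Str.count ext "R" + PySem.Str.count ext "K"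
            + PySem.Str.count ext "E" + PySem.Str.count ext "D" : Nat) : Int) then
          (regs, Ss, Es, ps, stop, ps, stop, ext)
        else (regs, Ss, Es, ps, pe, lst_s, lst_e, ext)
      else
        if cutoff ≤ ((PySem.Str.count ext "R" + PySem.Str.count ext "K"
            + PySem.Str.count ext "E" + PySem.Str.count ext "D" : Nat) : Int) then
          (regs ++ [PySem.Str.slice Sequence (some ps) (some (pe + 1))],
           Ss ++ [ps], Es ++ [pe + 1], 0, 0, lst_s, lst_e, ext)
        else (regs, Ss, Es, ps, pe, lst_s, lst_e, ext)
    else (regs, Ss, Es, ps, pe, lst_s, lst_e, ext)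

def score_polyamp (Sequence : String) (window : Int) (cutoff : Int) : List String × List Int × List Int :=
  let w2 := PySem.Int.floordiv window 2
  let st := (PySem.List.pyRange w2 (1 + PySem.Str.len Sequence - w2) 1).foldl
      (pvStepA Sequence cutoff w2) ([], [], [], 0, 0, 0, 0, "")
  match st with
  | (regs, Ss, Es, _, _, lst_s, lst_e, _) =>
    if lst_e ≠ 0 then
      let temp1 := PySem.Str.slice Sequence (some lst_s) (some (lst_e + 1))
      if temp1 ∈ regs then (regs, Ss, Es)
      else (regs ++ [temp1], Ss ++ [lst_s], Es ++ [lst_e + 1])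
    else (regs, Ss, Es)

-- ===== PORT B =====
-- stage 1: pref[k] = number of charged residues among the first k characters (running counter c)
def pvPrefB (Sequence : String) : List Int :=
  (Sequence.toList.foldl
    (fun (st : List Int × Int) ch =>
      let c := st.2 + (if PySem.Chars.isIn [ch] ['R', 'K', 'E', 'D'] then (1 : Int) else 0)
      (st.1 ++ [c], c)) ([0], 0)).1

-- charged residues in Sequence[a:b], Python slice index rules, as a prefix difference
def pvChargedB (pfx : List Int) (n a b : Int) : Int :=
  let a := if a < 0 then a + n else a
  let b := if b < 0 then b + n else b
  let a := min (max a 0) n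
  let b := min (max b 0) n
  if a < b then PySem.List.pyGetD pfx b 0 - PySem.List.pyGetD pfx a 0 else 0

-- stage 3 state: (intervals, ps, pe, ls, le, extc); only hit positions reach this machine
def pvMergeB (pfx : List Int) (n cutoff w2 : Int)
    (st : List (Int × Int) × Int × Int × Int × Int × Int) (j : Int) :
    List (Int × Int) × Int × Int × Int × Int × Int :=
  match st with
  | (ivs, ps, pe, ls, le, extc) =>
    let start := j - w2
    let stop := j + w2
    if ps = 0 then
      let extc' := pvChargedB pfx n 0 stop
      if cutoff ≤ extc' then (ivs, start, stop, start, stop, extc')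
      else (ivs, ps, pe, ls, le, extc')
    else if pe + 5 > start then
      if cutoff ≤ extc then (ivs, ps, stop, ps, stop, extc)
      else (ivs, ps, pe, ls, le, extc)
    else if cutoff ≤ extc then (ivs ++ [(ps, pe + 1)], 0, 0, ls, le, extc)
    else (ivs, ps, pe, ls, le, extc)

def score_polyamp_alt (Sequence : String) (window : Int) (cutoff : Int) : List String × List Int × List Int :=
  let n := PySem.Str.len Sequence
  let w2 := PySem.Int.floordiv window 2
  let pfx := pvPrefB Sequence
  let hits := (PySem.List.pyRange w2 (1 + n - w2) 1).filter
      (fun j => decide (cutoff ≤ pvChargedB pfx n (j - w2) (j + w2)))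
  match hits.foldl (pvMergeB pfx n cutoff w2) ([], 0, 0, 0, 0, 0) with
  | (ivs, _, _, ls, le, _) =>
    let regions := ivs.map (fun p => PySem.Str.slice Sequence (some p.1) (some p.2))
    let Starts := ivs.map Prod.fst
    let Ends := ivs.map Prod.snd
    if le ≠ 0 then
      let temp1 := PySem.Str.slice Sequence (some ls) (some (le + 1))
      if temp1 ∈ regions then (regions, Starts, Ends)
      else (regions ++ [temp1], Starts ++ [ls], Ends ++ [le + 1])
    else (regions, Starts, Ends)

-- ===== PRECONDITION & SPEC =====
def Spec_score_polyamp (Sequence : String) (window : Int) (cutoff : Int) (out : List String × List Int × List Int) : Prop := out = score_polyamp_alt Sequence window cutoff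
instance (Sequence : String) (window : Int) (cutoff : Int) (out : List String × List Int × List Int) : Decidable (Spec_score_polyamp Sequence window cutoff out) := by unfold Spec_score_polyamp; infer_instance

-- ===== CLAIM (what is proved, stated in full; the proofs are below) =====
def Claim_equal_score_polyamp : Prop := ∀ (Sequence : String) (window : Int) (cutoff : Int), Dom_score_polyamp Sequence window cutoff → Spec_score_polyamp Sequence window cutoff (score_polyamp Sequence window cutoff)

-- ===== LEMMAS AND PROOFS =====

-- a character is "charged" iff it is one of R, K, E, D (B's membership test)
def pvChg (c : Char) : Bool := PySem.Chars.isIn [c] ['R', 'K', 'E', 'D']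

-- charge count of a list of characters
def pvCnt (l : List Char) : Int := l.countP pvChg

-- the string slice Sequence[a:b] for an interval pair
def pvSlc (Sequence : String) (p : Int × Int) : String :=
  PySem.Str.slice Sequence (some p.1) (some p.2)

lemma pvChg_iff (c : Char) : pvChg c = (c == 'R' || c == 'K' || c == 'E' || c == 'D') := by
  rw [Bool.eq_iff_iff]
  unfold pvChg
  rw [PySem.Chars.isIn_iff_infix, List.singleton_infix_iff]
  simp only [Bool.or_eq_true, beq_iff_eq, List.mem_cons, List.not_mem_nil, or_false]
  tauto

lemma count_go_single (c : Char) (l : List Char) (fuel acc : Nat) (h : l.length ≤ fuel) :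
    PySem.Chars.count.go [c] fuel l acc = acc + l.count c := by
  induction l generalizing fuel acc with
  | nil => cases fuel <;> simp [PySem.Chars.count.go]
  | cons hd t ih =>
    cases fuel with
    | zero => simp at h
    | succ f =>
      simp only [List.length_cons, Nat.add_le_add_iff_right] at h
      rw [PySem.Chars.count.go]
      have hpre : List.isPrefixOf [c] (hd :: t) = (c == hd) := by
        simp [List.isPrefixOf]
      rw [hpre]
      by_cases hc : c = hd
      · subst hc
        simp only [beq_self_eq_true, if_true, List.length_cons, List.length_nil,
          List.drop_succ_cons, List.drop_zero]
        rw [ih f (acc + 1) h, List.count_cons]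
        simp
        omega
      · rw [if_neg (by simp [beq_eq_false_iff_ne.mpr hc]), ih f acc h, List.count_cons]
        simp [beq_eq_false_iff_ne.mpr (Ne.symm hc)]

lemma count_single (l : List Char) (c : Char) : PySem.Chars.count l [c] = l.count c := by
  rw [PySem.Chars.count]
  simp [count_go_single c l l.length 0 le_rfl]

-- A's four .count scans sum to the charge count
lemma sumCounts_eq_cnt (l : List Char) :
    ((PySem.Chars.count l ['R'] + PySem.Chars.count l ['K']
      + PySem.Chars.count l ['E'] + PySem.Chars.count l ['D'] : Nat) : Int) = pvCnt l := by
  simp only [count_single]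
  unfold pvCnt
  induction l with
  | nil => rfl
  | cons c t ih =>
    simp only [List.count_cons, List.countP_cons, pvChg_iff]
    push_cast at *
    by_cases h1 : c = 'R' <;> by_cases h2 : c = 'K' <;> by_cases h3 : c = 'E' <;>
      by_cases h4 : c = 'D' <;> simp_all <;> omega

lemma prefFold_eq (l0 : List Char) :
    l0.foldl
      (fun (st : List Int × Int) ch =>
        let c := st.2 + (if PySem.Chars.isIn [ch] ['R', 'K', 'E', 'D'] then (1 : Int) else 0)
        (st.1 ++ [c], c)) ([0], 0)
      = ((List.range (l0.length + 1)).map (fun k => pvCnt (l0.take k)), pvCnt l0) := by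
  induction l0 using List.reverseRecOn with
  | nil => rfl
  | append_singleton l c ih =>
    rw [List.foldl_append, List.foldl_cons, List.foldl_nil, ih]
    have hc : pvCnt (l ++ [c]) = pvCnt l + (if PySem.Chars.isIn [c] ['R', 'K', 'E', 'D'] then (1 : Int) else 0) := by
      unfold pvCnt
      rw [List.countP_append]
      simp [pvChg]
    refine Prod.ext ?_ (by simpa using hc.symm)
    simp only
    conv_rhs => rw [show (l ++ [c]).length + 1 = (l.length + 1) + 1 by simp,
      List.range_succ, List.map_append]
    congr 1
    · exact (List.map_congr_left fun k hk => by
        rw [List.take_append_of_le_length (Nat.lt_succ_iff.mp (List.mem_range.mp hk))]).symm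
    · simp only [List.map_cons, List.map_nil]
      congr 1
      rw [List.take_of_length_le (by simp)]
      exact hc.symm

lemma prefB_eq (Sequence : String) :
    pvPrefB Sequence
      = (List.range (Sequence.toList.length + 1)).map (fun k => pvCnt (Sequence.toList.take k)) := by
  unfold pvPrefB
  rw [prefFold_eq]

lemma pyGetD_prefB (Sequence : String) (k : Nat) (hk : k ≤ Sequence.toList.length) :
    PySem.List.pyGetD (pvPrefB Sequence) (k : Int) 0 = pvCnt (Sequence.toList.take k) := by
  rw [prefB_eq, PySem.List.pyGetD_natCast]
  exact PySem.List.getD_map_range _ _ _ _ (by omega)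

-- B's index normalisation is exactly Python's slice-bound clamping
lemma norm_eq_clampIdx (n : Nat) (a : Int) :
    (min (max (if a < 0 then a + n else a) 0) (n : Int)) = (PySem.List.clampIdx n a : Int) := by
  simp only [PySem.List.clampIdx]
  split_ifs <;> push_cast <;> omega

lemma cnt_take_sub (l : List Char) (a b : Nat) (hab : a ≤ b) :
    pvCnt ((l.drop a).take (b - a)) = pvCnt (l.take b) - pvCnt (l.take a) := by
  have h1 : l.take a ++ (l.take b).drop a = l.take b := by
    conv_lhs => rw [show l.take a = (l.take b).take a by rw [List.take_take, min_eq_left hab]]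
    exact List.take_append_drop a (l.take b)
  have h2 : pvCnt (l.take b) = pvCnt (l.take a) + pvCnt ((l.take b).drop a) := by
    unfold pvCnt
    conv_lhs => rw [← h1]
    push_cast [List.countP_append]
    ring
  rw [List.drop_take] at h2
  omega

-- B's prefix difference equals the charge count of the slice
lemma chargedB_eq (Sequence : String) (a b : Int) :
    pvChargedB (pvPrefB Sequence) (PySem.Str.len Sequence) a b
      = pvCnt (PySem.List.slice Sequence.toList (some a) (some b)) := by
  have hlen : PySem.Str.len Sequence = (Sequence.toList.length : Int) := rfl
  simp only [pvChargedB, hlen]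
  rw [norm_eq_clampIdx Sequence.toList.length a, norm_eq_clampIdx Sequence.toList.length b]
  have hsl : PySem.List.slice Sequence.toList (some a) (some b)
      = (Sequence.toList.drop (PySem.List.clampIdx Sequence.toList.length a)).take
          (PySem.List.clampIdx Sequence.toList.length b - PySem.List.clampIdx Sequence.toList.length a) := by
    simp [PySem.List.slice]
  rw [hsl]
  by_cases hab : PySem.List.clampIdx Sequence.toList.length a < PySem.List.clampIdx Sequence.toList.length b
  · rw [if_pos (by exact_mod_cast hab)]
    rw [pyGetD_prefB _ _ (PySem.List.clampIdx_le _ _), pyGetD_prefB _ _ (PySem.List.clampIdx_le _ _)]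
    rw [cnt_take_sub Sequence.toList _ _ (le_of_lt hab)]
  · rw [if_neg (by exact_mod_cast hab)]
    rw [show PySem.List.clampIdx Sequence.toList.length b
        - PySem.List.clampIdx Sequence.toList.length a = 0 by omega]
    rfl

lemma strCounts_eq_cnt (s : String) :
    ((PySem.Str.count s "R" + PySem.Str.count s "K"
      + PySem.Str.count s "E" + PySem.Str.count s "D" : Nat) : Int) = pvCnt s.toList := by
  simp only [PySem.Str.count_eq]
  rw [show ("R" : String).toList = ['R'] from rfl, show ("K" : String).toList = ['K'] from rfl,
    show ("E" : String).toList = ['E'] from rfl, show ("D" : String).toList = ['D'] from rfl]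
  exact sumCounts_eq_cnt s.toList

lemma strScore_eq_cnt (s : String) :
    ((PySem.Str.count s "R" : Int) + (PySem.Str.count s "K" : Int))
      + ((PySem.Str.count s "E" : Int) + (PySem.Str.count s "D" : Int)) = pvCnt s.toList := by
  have h := strCounts_eq_cnt s
  push_cast at h ⊢
  omega

-- the main simulation: folding A over any position list equals folding B's merge
-- machine over the hit positions only, through the interval-pair abstraction
lemma main_rel (Sequence : String) (cutoff w2 : Int) (l : List Int)
    (ivs : List (Int × Int)) (ps pe ls le : Int) (ext : String) :
    ∃ ivs' ps' pe' ls' le' ext',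
      l.foldl (pvStepA Sequence cutoff w2)
          (ivs.map (pvSlc Sequence), ivs.map Prod.fst, ivs.map Prod.snd, ps, pe, ls, le, ext)
        = (ivs'.map (pvSlc Sequence), ivs'.map Prod.fst, ivs'.map Prod.snd, ps', pe', ls', le', ext')
      ∧ (l.filter (fun j => decide (cutoff ≤ pvChargedB (pvPrefB Sequence)
            (PySem.Str.len Sequence) (j - w2) (j + w2)))).foldl
            (pvMergeB (pvPrefB Sequence) (PySem.Str.len Sequence) cutoff w2)
            (ivs, ps, pe, ls, le, pvCnt ext.toList)
        = (ivs', ps', pe', ls', le', pvCnt ext'.toList) := by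
  induction l generalizing ivs ps pe ls le ext with
  | nil => exact ⟨ivs, ps, pe, ls, le, ext, rfl, rfl⟩
  | cons j t ih =>
    have hwin : pvChargedB (pvPrefB Sequence) (PySem.Str.len Sequence) (j - w2) (j + w2)
        = pvCnt (PySem.Str.slice Sequence (some (j - w2)) (some (j + w2))).toList := by
      rw [chargedB_eq, PySem.Str.toList_slice, PySem.Chars.slice_eq_listSlice]
    by_cases hhit : cutoff ≤ pvChargedB (pvPrefB Sequence) (PySem.Str.len Sequence) (j - w2) (j + w2)
    · rw [List.foldl_cons, List.filter_cons, if_pos (by simpa using hhit), List.foldl_cons]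
      rw [hwin] at hhit
      simp only [pvStepA, pvMergeB, strScore_eq_cnt, strCounts_eq_cnt]
      rw [if_pos hhit]
      by_cases hps : ps = 0
      · rw [if_pos hps, if_pos hps]
        subst hps
        have hext' : pvChargedB (pvPrefB Sequence) (PySem.Str.len Sequence) 0 (j + w2)
            = pvCnt (PySem.Str.slice Sequence (some 0) (some (j + w2))).toList := by
          rw [chargedB_eq, PySem.Str.toList_slice, PySem.Chars.slice_eq_listSlice]
        rw [hext']
        by_cases hc : cutoff ≤ pvCnt (PySem.Str.slice Sequence (some 0) (some (j + w2))).toList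
        · simp only [if_pos hc]
          exact ih ivs _ _ _ _ (PySem.Str.slice Sequence (some 0) (some (j + w2)))
        · simp only [if_neg hc]
          exact ih ivs _ _ _ _ (PySem.Str.slice Sequence (some 0) (some (j + w2)))
      · rw [if_neg hps, if_neg hps]
        by_cases hnear : pe + 5 > j - w2
        · rw [if_pos hnear, if_pos hnear]
          by_cases hc : cutoff ≤ pvCnt ext.toList
          · simp only [if_pos hc]
            exact ih ivs _ _ _ _ ext
          · simp only [if_neg hc]
            exact ih ivs _ _ _ _ ext
        · rw [if_neg hnear, if_neg hnear]
          by_cases hc : cutoff ≤ pvCnt ext.toList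
          · simp only [if_pos hc]
            have := ih (ivs ++ [(ps, pe + 1)]) 0 0 ls le ext
            simpa [pvSlc] using this
          · simp only [if_neg hc]
            exact ih ivs _ _ _ _ ext
    · rw [List.foldl_cons, List.filter_cons, if_neg (by simpa using hhit), hwin] at *
      simp only [pvStepA, strScore_eq_cnt]
      rw [if_neg hhit]
      exact ih ivs _ _ _ _ ext

-- ===== VERDICT (by name: the statement is the Claim_ definition above) =====
theorem score_polyamp_spec : Claim_equal_score_polyamp := by
  intro Sequence window cutoff _
  simp only [Spec_score_polyamp, score_polyamp, score_polyamp_alt]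
  obtain ⟨ivs', ps', pe', ls', le', ext', hA, hB⟩ :=
    main_rel Sequence cutoff (PySem.Int.floordiv window 2)
      (PySem.List.pyRange (PySem.Int.floordiv window 2)
        (1 + PySem.Str.len Sequence - PySem.Int.floordiv window 2) 1)
      [] 0 0 0 0 ""
  simp only [List.map_nil] at hA
  rw [hA]
  rw [show pvCnt "".toList = (0 : Int) from rfl] at hB
  rw [hB]
  rfl
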